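-- pv_equiv track=rewrite | github.com/d1agnozzz/S-AoDP | Kursovaya/t9.py | reverso_lexycograph
-- ===== SOURCE A (Python) =====
-- def reverso_lexycograph(n, costs, strs):
--     r_strs = [strs[i][::-1] for i in range(n)]  # reversed
--
--     from math import inf
--     maxx = inf
--
--     dp = [[maxx, maxx] for i in range(n)]
--     # not reversed
--     dp[0][0] = 0
--     # reversed (cost wasted)
--     dp[0][1] = costs[0]
--
--     for i in range(1, n):
--
--         if r_strs[i] >= strs[i - 1]:
--             dp[i][1] = dp[i - 1][0] + costs[i]
--         if r_strs[i] >= r_strs[i - 1]: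
--             dp[i][1] = min(dp[i][1], dp[i - 1][1] + costs[i])
--         if strs[i] >= r_strs[i - 1]:
--             dp[i][0] = dp[i - 1][1]
--         if strs[i] >= strs[i - 1]:
--             dp[i][0] = min(dp[i][0], dp[i - 1][0])
--     ans = min(dp[-1])
--     if ans >= maxx:
--         return -1
--     else:
--         return ans
-- ===== SOURCE B (Python) =====
-- def reverso_lexycograph(n, costs, strs):
--     # Top-down over suffixes: f(i, r) = min cost to orient strings i..n-1 given that
--     # string i is used in orientation r (1 = reversed, paying costs[i]).
--     # Memoized; evaluated with an explicit work stack instead of Python recursion.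
--     from math import inf
--     rev = [strs[i][::-1] for i in range(n)]
--     memo = {}
--
--     def node(i, r):
--         # own cost, chosen string, and the feasible dependencies of f(i, r)
--         own = costs[i] if r else 0
--         cur = rev[i] if r else strs[i]
--         if i == n - 1:
--             return own, None
--         deps = []
--         if strs[i + 1] >= cur:
--             deps.append((i + 1, 0))
--         if rev[i + 1] >= cur:
--             deps.append((i + 1, 1))
--         return own, deps
--
--     def f(start):
--         stack = [start]
--         while stack:
--             key = stack[-1]
--             if key in memo:
--                 stack.pop()
--                 continue
--             own, deps = node(*key)
--             if deps is None:
--                 memo[key] = own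
--                 stack.pop()
--                 continue
--             pending = [d for d in deps if d not in memo]
--             if pending:
--                 stack.extend(pending)
--             else:
--                 best = min((memo[d] for d in deps), default=inf)
--                 memo[key] = own + best
--                 stack.pop()
--         return memo[start]
--
--     ans = min(f((0, 0)), f((0, 1)))
--     return -1 if ans == inf else ans
-- ===== Notes on version B (the rewrite author's own statement) =====
-- stated objective: alternative
-- what changed: Replaces A's forward tabulated DP (preallocated dp array filled left-to-right by index, read out at dp[-1]) with a memoized top-down evaluation of f(i, r) over suffixes (minimum cost to orient strings i..n-1 with string i in orientation r, driven by an explicit work stack), answering min(f(0,0), f(0,1)).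
import Mathlib
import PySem

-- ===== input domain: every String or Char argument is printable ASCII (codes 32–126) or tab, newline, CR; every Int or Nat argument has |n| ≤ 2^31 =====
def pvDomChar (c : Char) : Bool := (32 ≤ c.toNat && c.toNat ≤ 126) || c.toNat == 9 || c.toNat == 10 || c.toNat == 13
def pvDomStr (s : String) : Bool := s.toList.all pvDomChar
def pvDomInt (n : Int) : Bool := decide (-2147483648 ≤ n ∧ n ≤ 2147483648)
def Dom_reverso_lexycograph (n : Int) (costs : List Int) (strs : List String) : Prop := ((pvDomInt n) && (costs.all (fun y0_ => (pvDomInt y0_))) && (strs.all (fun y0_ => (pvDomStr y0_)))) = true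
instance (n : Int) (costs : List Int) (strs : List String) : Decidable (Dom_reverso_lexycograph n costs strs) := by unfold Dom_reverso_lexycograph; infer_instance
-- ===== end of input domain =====

-- B replaces A's forward tabulated DP (dp array indexed 0..n-1, filled left to right)
-- by a memoized top-down recursion over suffixes; same return value, objective: alternative decomposition.

-- ===== PORT A =====
-- Python's float('inf') sentinel is modelled by ⊤ in `WithTop Int`; `ans >= inf → -1` is `WithTop.untopD (-1)`.
-- Python `a >= b` on strings (code-point lexicographic):
def pvGe (a b : String) : Bool := !(PySem.Chars.strLt a.toList b.toList)
-- Python s[::-1]: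
def pvRev (s : String) : String := (PySem.Str.slice? s none none (-1)).getD ""

-- the body of A's `for i in range(1, n)` loop, verbatim
def pvLoopA (r_strs : List String) (costs : List Int) (strs : List String)
    (dp : List (WithTop Int × WithTop Int)) (i : Int) : List (WithTop Int × WithTop Int) :=
  let prev := PySem.List.pyGetD dp (i - 1) ((⊤ : WithTop Int), (⊤ : WithTop Int))
  let ci : WithTop Int := ((PySem.List.pyGetD costs i 0 : Int) : WithTop Int)
  -- if r_strs[i] >= strs[i-1]: dp[i][1] = dp[i-1][0] + costs[i]
  let v1 : WithTop Int :=
    if pvGe (PySem.List.pyGetD r_strs i "") (PySem.List.pyGetD strs (i - 1) "") then prev.1 + ci else ⊤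
  -- if r_strs[i] >= r_strs[i-1]: dp[i][1] = min(dp[i][1], dp[i-1][1] + costs[i])
  let v1 :=
    if pvGe (PySem.List.pyGetD r_strs i "") (PySem.List.pyGetD r_strs (i - 1) "") then min v1 (prev.2 + ci) else v1
  -- if strs[i] >= r_strs[i-1]: dp[i][0] = dp[i-1][1]
  let v0 : WithTop Int :=
    if pvGe (PySem.List.pyGetD strs i "") (PySem.List.pyGetD r_strs (i - 1) "") then prev.2 else ⊤
  -- if strs[i] >= strs[i-1]: dp[i][0] = min(dp[i][0], dp[i-1][0])
  let v0 :=
    if pvGe (PySem.List.pyGetD strs i "") (PySem.List.pyGetD strs (i - 1) "") then min v0 prev.1 else v0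
  PySem.List.pySetD dp i (v0, v1)

def reverso_lexycograph (n : Int) (costs : List Int) (strs : List String) : Int :=
  -- r_strs = [strs[i][::-1] for i in range(n)]
  let r_strs : List String := (PySem.List.pyRange 0 n 1).map (fun i => pvRev ((PySem.List.pyGet? strs i).getD ""))
  -- dp = [[inf, inf] for i in range(n)]
  let dp : List (WithTop Int × WithTop Int) := (PySem.List.pyRange 0 n 1).map (fun _ => ((⊤ : WithTop Int), (⊤ : WithTop Int)))
  -- dp[0][0] = 0 ; dp[0][1] = costs[0]
  let dp := PySem.List.pySetD dp 0 ((0 : WithTop Int), ((PySem.List.pyGetD costs 0 0 : Int) : WithTop Int))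
  -- for i in range(1, n): …
  let dp := (PySem.List.pyRange 1 n 1).foldl (pvLoopA r_strs costs strs) dp
  -- ans = min(dp[-1]); return -1 if ans >= inf else ans
  let last := (PySem.List.pyGet? dp (-1)).getD ((⊤ : WithTop Int), (⊤ : WithTop Int))
  WithTop.untopD (-1) (min last.1 last.2)

-- ===== PORT B =====
-- f(i, r) for r = 0, 1 at once: given the current triple (strs[i], rev[i], costs[i]) and the
-- remaining triples, return (f(i,0), f(i,1)) (memoization in Source B = each pair computed once here).
def pvBRec : String → String → Int → List (String × String × Int) → WithTop Int × WithTop Int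
  | _, _, c, [] => ((0 : WithTop Int), ((c : Int) : WithTop Int))
  | f, r, c, (f', r', c') :: ts =>
    let nxt := pvBRec f' r' c' ts
    let best := fun (cur : String) =>
      min (if pvGe f' cur then nxt.1 else (⊤ : WithTop Int)) (if pvGe r' cur then nxt.2 else ⊤)
    (best f, ((c : Int) : WithTop Int) + best r)

def reverso_lexycograph_alt (n : Int) (costs : List Int) (strs : List String) : Int :=
  -- rev = [strs[i][::-1] for i in range(n)]
  let rev : List String := (PySem.List.pyRange 0 n 1).map (fun i => pvRev ((PySem.List.pyGet? strs i).getD ""))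
  let ts : List (String × String × Int) := (PySem.List.pyRange 0 n 1).map (fun i =>
    ((PySem.List.pyGet? strs i).getD "", PySem.List.pyGetD rev i "", PySem.List.pyGetD costs i 0))
  match ts with
  | [] => -1      -- unreachable under Pre_ (Python B raises IndexError when n ≤ 0)
  | t :: rest =>
    let p := pvBRec t.1 t.2.1 t.2.2 rest
    -- ans = min(f(0,0), f(0,1)); return -1 if ans == inf else ans
    WithTop.untopD (-1) (min p.1 p.2)

-- ===== PRECONDITION & SPEC =====
-- Pre_ = exactly the inputs where Python A returns: it indexes costs[0], strs[i] and costs[i]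
-- for 0 ≤ i < n and dp[0]/dp[-1], so it raises IndexError iff n < 1 or n exceeds a list length.
def Pre_reverso_lexycograph (n : Int) (costs : List Int) (strs : List String) : Prop :=
  1 ≤ n ∧ n ≤ (costs.length : Int) ∧ n ≤ (strs.length : Int)
instance (n : Int) (costs : List Int) (strs : List String) : Decidable (Pre_reverso_lexycograph n costs strs) := by
  unfold Pre_reverso_lexycograph; infer_instance

def pvWitness_reverso_lexycograph : Int × List Int × List String := (2, [3, 1], ["ba", "ab"])

def Spec_reverso_lexycograph (n : Int) (costs : List Int) (strs : List String) (out : Int) : Prop := out = reverso_lexycograph_alt n costs strs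
instance (n : Int) (costs : List Int) (strs : List String) (out : Int) : Decidable (Spec_reverso_lexycograph n costs strs out) := by unfold Spec_reverso_lexycograph; infer_instance

-- ===== CLAIM (what is proved, stated in full; the proofs are below) =====
def Claim_equal_reverso_lexycograph : Prop := ∀ (n : Int) (costs : List Int) (strs : List String), Dom_reverso_lexycograph n costs strs → Pre_reverso_lexycograph n costs strs → Spec_reverso_lexycograph n costs strs (reverso_lexycograph n costs strs)

-- ===== LEMMAS AND PROOFS =====

-- Proof-side vocabulary: totalized getters and the two recurrences the ports compute.
def pvS (strs : List String) (k : Nat) : String := strs.getD k ""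
def pvTrip (costs : List Int) (strs : List String) (k : Nat) : String × String × Int :=
  (pvS strs k, pvRev (pvS strs k), costs.getD k 0)

-- One iteration of A's loop body (on already-resolved values).
def pvStep (p : WithTop Int × WithTop Int) (pf pr : String) (t : String × String × Int) :
    WithTop Int × WithTop Int :=
  ((if pvGe t.1 pf then min (if pvGe t.1 pr then p.2 else ⊤) p.1
    else (if pvGe t.1 pr then p.2 else (⊤ : WithTop Int))),
   (if pvGe t.2.1 pr then
      min (if pvGe t.2.1 pf then p.1 + ((t.2.2 : Int) : WithTop Int) else ⊤) (p.2 + ((t.2.2 : Int) : WithTop Int))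
    else (if pvGe t.2.1 pf then p.1 + ((t.2.2 : Int) : WithTop Int) else (⊤ : WithTop Int))))

-- A's dp row k.
def pvQ (costs : List Int) (strs : List String) : Nat → WithTop Int × WithTop Int
  | 0 => ((0 : WithTop Int), ((costs.getD 0 0 : Int) : WithTop Int))
  | k + 1 => pvStep (pvQ costs strs k) (pvS strs k) (pvRev (pvS strs k)) (pvTrip costs strs (k + 1))

-- B's suffix value: min cost to orient the remaining triples given the previously chosen string.
def pvH : String → List (String × String × Int) → WithTop Int
  | _, [] => 0
  | s, (f, r, c) :: ts =>
    min (if pvGe f s then pvH f ts else ⊤) (if pvGe r s then ((c : Int) : WithTop Int) + pvH r ts else ⊤)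

def pvSuff (costs : List Int) (strs : List String) (m j : Nat) : List (String × String × Int) :=
  (List.range' j (m - j)).map (pvTrip costs strs)

-- the meet-in-the-middle quantity, constant in j
def pvG (costs : List Int) (strs : List String) (m j : Nat) : WithTop Int :=
  min ((pvQ costs strs j).1 + pvH (pvS strs j) (pvSuff costs strs m (j + 1)))
      ((pvQ costs strs j).2 + pvH (pvRev (pvS strs j)) (pvSuff costs strs m (j + 1)))

lemma pvBRec_eq (ts : List (String × String × Int)) : ∀ (f r : String) (c : Int),
    pvBRec f r c ts = (pvH f ts, ((c : Int) : WithTop Int) + pvH r ts) := by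
  induction ts with
  | nil => intro f r c; simp [pvBRec, pvH]
  | cons t ts ih =>
    obtain ⟨f', r', c'⟩ := t
    intro f r c
    simp only [pvBRec, ih, pvH]

lemma pvMin_add (a b c : WithTop Int) : min a b + c = min (a + c) (b + c) :=
  (min_add_add_right a b c).symm

lemma pvAdd_min (a b c : WithTop Int) : a + min b c = min (a + b) (a + c) :=
  (min_add_add_left a b c).symm

lemma pvExchange (p1 p2 hf hr : WithTop Int) (c : Int) (b1 b2 b3 b4 : Bool) :
    min ((if b2 then min (if b1 then p2 else ⊤) p1 else (if b1 then p2 else ⊤)) + hf)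
        ((if b4 then min (if b3 then p1 + (c : WithTop Int) else ⊤) (p2 + (c : WithTop Int))
          else (if b3 then p1 + (c : WithTop Int) else ⊤)) + hr)
    = min (p1 + min (if b2 then hf else ⊤) (if b3 then (c : WithTop Int) + hr else ⊤))
          (p2 + min (if b1 then hf else ⊤) (if b4 then (c : WithTop Int) + hr else ⊤)) := by
  have hca : ∀ x : WithTop Int, x + (c : WithTop Int) + hr = x + ((c : WithTop Int) + hr) := by
    intro x; rw [add_assoc]
  cases b1 <;> cases b2 <;> cases b3 <;> cases b4 <;>
    simp [pvMin_add, pvAdd_min, top_add, add_top, hca, min_comm, min_assoc, min_left_comm]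

lemma pvSuff_cons (costs : List Int) (strs : List String) (m j : Nat) (h : j < m) :
    pvSuff costs strs m j = pvTrip costs strs j :: pvSuff costs strs m (j + 1) := by
  unfold pvSuff
  rw [show m - j = (m - (j + 1)) + 1 by omega, List.range'_succ]
  simp

lemma pvH_cons (s f r : String) (c : Int) (ts : List (String × String × Int)) :
    pvH s ((f, r, c) :: ts) =
      min (if pvGe f s then pvH f ts else ⊤)
          (if pvGe r s then ((c : Int) : WithTop Int) + pvH r ts else ⊤) := rfl

lemma pvQ_succ (costs : List Int) (strs : List String) (k : Nat) :
    pvQ costs strs (k + 1)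
      = pvStep (pvQ costs strs k) (pvS strs k) (pvRev (pvS strs k)) (pvTrip costs strs (k + 1)) := rfl

set_option maxHeartbeats 1000000 in
lemma pvG_step (costs : List Int) (strs : List String) (m j : Nat) (h : j + 1 < m) :
    pvG costs strs m j = pvG costs strs m (j + 1) := by
  unfold pvG
  rw [pvSuff_cons costs strs m (j + 1) h, pvQ_succ]
  rw [pvH_cons, pvH_cons]
  simp only [pvStep, pvTrip]
  exact (pvExchange (pvQ costs strs j).1 (pvQ costs strs j).2
    (pvH (pvS strs (j + 1)) (pvSuff costs strs m (j + 1 + 1)))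
    (pvH (pvRev (pvS strs (j + 1))) (pvSuff costs strs m (j + 1 + 1)))
    (costs.getD (j + 1) 0)
    (pvGe (pvS strs (j + 1)) (pvRev (pvS strs j)))
    (pvGe (pvS strs (j + 1)) (pvS strs j))
    (pvGe (pvRev (pvS strs (j + 1))) (pvS strs j))
    (pvGe (pvRev (pvS strs (j + 1))) (pvRev (pvS strs j)))).symm

lemma pvG_const (costs : List Int) (strs : List String) (m j : Nat) (h1 : 1 ≤ m) (h2 : j ≤ m - 1) :
    pvG costs strs m 0 = pvG costs strs m j := by
  induction j with
  | zero => rfl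
  | succ k ih =>
    rw [ih (by omega), pvG_step]
    omega
lemma pvSetD_append_cons {α : Type} (pre : List α) (x v : α) (post : List α) :
    PySem.List.pySetD (pre ++ x :: post) (pre.length : Int) v = pre ++ v :: post := by
  simp [PySem.List.pySetD, PySem.List.pySet?, PySem.List.pyIdx?]

set_option maxHeartbeats 1000000 in
lemma pvLoopA_app (n : Int) (costs : List Int) (strs : List String) (m k : Nat)
    (hn : (m : Int) = n) (_hc : n ≤ (costs.length : Int)) (_hs : n ≤ (strs.length : Int))
    (hk : k + 1 ≤ m - 1) (hm : 1 ≤ m) :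
    pvLoopA ((PySem.List.pyRange 0 n 1).map (fun i => pvRev ((PySem.List.pyGet? strs i).getD "")))
      costs strs
      ((List.range (k + 1)).map (pvQ costs strs) ++ List.replicate (m - 1 - k) (⊤, ⊤))
      (1 + (k : Int))
    = (List.range (k + 1 + 1)).map (pvQ costs strs) ++ List.replicate (m - 1 - (k + 1)) (⊤, ⊤) := by
  have hi : (1 : Int) + (k : Int) = ((k + 1 : Nat) : Int) := by push_cast; ring
  have hi1 : ((k + 1 : Nat) : Int) - 1 = ((k : Nat) : Int) := by push_cast; ring
  simp only [pvLoopA, hi, hi1]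
  rw [PySem.List.pyGetD_map_pyRange_of_nonneg _ n _ _ (by omega) (by omega),
      PySem.List.pyGetD_map_pyRange_of_nonneg _ n _ _ (by omega) (by omega)]
  simp only [PySem.List.pyGetD_natCast, PySem.List.pyGet?_natCast]
  simp only [← List.getD_eq_getElem?_getD]
  have hdp : (List.map (pvQ costs strs) (List.range (k + 1)) ++
      List.replicate (m - 1 - k) ((⊤ : WithTop Int), (⊤ : WithTop Int))).getD k (⊤, ⊤)
      = pvQ costs strs k := by
    rw [List.getD_eq_getElem?_getD, List.getElem?_append_left (by simp)]
    simp
  rw [hdp]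
  rw [show m - 1 - k = (m - 1 - (k + 1)) + 1 by omega, List.replicate_succ]
  have hset := pvSetD_append_cons (List.map (pvQ costs strs) (List.range (k + 1)))
    ((⊤ : WithTop Int), (⊤ : WithTop Int))
    (pvStep (pvQ costs strs k) (pvS strs k) (pvRev (pvS strs k)) (pvTrip costs strs (k + 1)))
    (List.replicate (m - 1 - (k + 1)) ((⊤ : WithTop Int), (⊤ : WithTop Int)))
  simp only [List.length_map, List.length_range] at hset
  simp only [pvStep, pvTrip, pvS] at hset
  have h2 : List.map (pvQ costs strs) (List.range (k + 1)) ++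
        pvStep (pvQ costs strs k) (pvS strs k) (pvRev (pvS strs k)) (pvTrip costs strs (k + 1)) ::
          List.replicate (m - 1 - (k + 1)) ((⊤ : WithTop Int), (⊤ : WithTop Int))
      = List.map (pvQ costs strs) (List.range (k + 1 + 1)) ++
          List.replicate (m - 1 - (k + 1)) ((⊤ : WithTop Int), (⊤ : WithTop Int)) := by
    rw [List.range_succ, List.map_append, List.range_succ, List.map_append, ← pvQ_succ]
    simp [List.range_succ]
  exact hset.trans h2


lemma pvA_inv (n : Int) (costs : List Int) (strs : List String) (m : Nat)
    (hm : 1 ≤ m) (hn : (m : Int) = n)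
    (hc : n ≤ (costs.length : Int)) (hs : n ≤ (strs.length : Int)) :
    ∀ k, k ≤ m - 1 →
    (PySem.List.pyRange 1 (1 + (k : Int)) 1).foldl
      (pvLoopA ((PySem.List.pyRange 0 n 1).map (fun i => pvRev ((PySem.List.pyGet? strs i).getD ""))) costs strs)
      (PySem.List.pySetD ((PySem.List.pyRange 0 n 1).map (fun _ => ((⊤ : WithTop Int), (⊤ : WithTop Int)))) 0
        ((0 : WithTop Int), ((PySem.List.pyGetD costs 0 0 : Int) : WithTop Int)))
    = (List.range (k + 1)).map (pvQ costs strs) ++ List.replicate (m - 1 - k) (⊤, ⊤) := by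
  intro k
  induction k with
  | zero =>
    intro _
    rw [show (1 : Int) + ((0 : Nat) : Int) = 1 by norm_num]
    rw [show PySem.List.pyRange 1 1 1 = [] from rfl]
    rw [List.foldl_nil]
    rw [← hn, PySem.List.pyRange_zero_natCast]
    rw [List.map_const']
    simp only [List.length_map, List.length_range]
    rw [show m = (m - 1) + 1 by omega]
    rw [List.replicate_succ]
    have hset := pvSetD_append_cons ([] : List (WithTop Int × WithTop Int))
      ((⊤ : WithTop Int), (⊤ : WithTop Int))
      ((0 : WithTop Int), ((PySem.List.pyGetD costs 0 0 : Int) : WithTop Int))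
      (List.replicate (m - 1) ((⊤ : WithTop Int), (⊤ : WithTop Int)))
    simp only [List.length_nil, Nat.cast_zero, List.nil_append] at hset
    rw [hset]
    simp only [show (0 : Nat) + 1 = 1 from rfl, List.range_one, List.map_cons, List.map_nil,
      List.singleton_append]
    rw [show m - 1 + 1 - 1 = m - 1 by omega, show m - 1 - 0 = m - 1 by omega]
    congr 1
    unfold pvQ
    rw [show (0 : Int) = ((0 : Nat) : Int) by norm_num, PySem.List.pyGetD_natCast]
  | succ k ih =>
    intro hk
    rw [show (1 : Int) + ((k + 1 : Nat) : Int) = (1 + (k : Int)) + 1 by push_cast; ring]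
    rw [PySem.List.pyRange_one_succ_right (by omega), List.foldl_append]
    rw [ih (by omega)]
    simp only [List.foldl_cons, List.foldl_nil]
    exact pvLoopA_app n costs strs m k hn hc hs hk hm

lemma pvA_eval (n : Int) (costs : List Int) (strs : List String) (m : Nat)
    (hm : 1 ≤ m) (hn : (m : Int) = n)
    (hc : n ≤ (costs.length : Int)) (hs : n ≤ (strs.length : Int)) :
    reverso_lexycograph n costs strs
      = WithTop.untopD (-1) (min (pvQ costs strs (m - 1)).1 (pvQ costs strs (m - 1)).2) := by
  unfold reverso_lexycograph
  simp only []
  rw [show PySem.List.pyRange 1 n 1 = PySem.List.pyRange 1 (1 + ((m - 1 : Nat) : Int)) 1 by congr 1; omega]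
  rw [pvA_inv n costs strs m hm hn hc hs (m - 1) (le_refl _)]
  rw [show m - 1 - (m - 1) = 0 by omega]
  simp only [List.replicate_zero, List.append_nil]
  have hlast : ((List.range (m - 1 + 1)).map (pvQ costs strs)).getLast? = some (pvQ costs strs (m - 1)) := by
    rw [List.range_succ, List.map_append, List.map_singleton, List.getLast?_concat]
  rw [PySem.List.pyGet?_neg_one, hlast]
  rfl

lemma pvB_eval (n : Int) (costs : List Int) (strs : List String) (m : Nat)
    (hm : 1 ≤ m) (hn : (m : Int) = n) :
    reverso_lexycograph_alt n costs strs
      = WithTop.untopD (-1)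
          (min (pvH (pvS strs 0) (pvSuff costs strs m 1))
               (((costs.getD 0 0 : Int) : WithTop Int) + pvH (pvRev (pvS strs 0)) (pvSuff costs strs m 1))) := by
  unfold reverso_lexycograph_alt
  simp only []
  have hmap : ∀ i ∈ PySem.List.pyRange 0 n 1,
      ((PySem.List.pyGet? strs i).getD "",
        PySem.List.pyGetD ((PySem.List.pyRange 0 n 1).map (fun i => pvRev ((PySem.List.pyGet? strs i).getD ""))) i "",
        PySem.List.pyGetD costs i 0)
      = ((PySem.List.pyGet? strs i).getD "", pvRev ((PySem.List.pyGet? strs i).getD ""), PySem.List.pyGetD costs i 0) := by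
    intro i hi
    rw [PySem.List.mem_pyRange_one] at hi
    rw [PySem.List.pyGetD_map_pyRange_of_nonneg _ n _ _ hi.1 hi.2]
  rw [List.map_congr_left hmap]
  rw [← hn, PySem.List.pyRange_zero_natCast, List.map_map]
  have hmap2 : (List.range m).map ((fun i => ((PySem.List.pyGet? strs i).getD "", pvRev ((PySem.List.pyGet? strs i).getD ""), PySem.List.pyGetD costs i 0)) ∘ (fun k : Nat => (k : Int)))
      = (List.range m).map (pvTrip costs strs) := by
    apply List.map_congr_left
    intro k _
    simp only [Function.comp_apply, PySem.List.pyGet?_natCast, PySem.List.pyGetD_natCast,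
      ← List.getD_eq_getElem?_getD]
    rfl
  rw [hmap2]
  rw [List.range_eq_range', show m = (m - 1) + 1 by omega, List.range'_succ, List.map_cons]
  show WithTop.untopD (-1) _ = _
  rw [pvBRec_eq]
  have hsuff : (List.range' (0 + 1) (m - 1)).map (pvTrip costs strs) = pvSuff costs strs (m - 1 + 1) 1 := by
    unfold pvSuff
    norm_num
  rw [hsuff]
  rfl

lemma pvG_last (costs : List Int) (strs : List String) (m : Nat) (hm : 1 ≤ m) :
    pvG costs strs m (m - 1) = min (pvQ costs strs (m - 1)).1 (pvQ costs strs (m - 1)).2 := by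
  unfold pvG pvSuff
  rw [show m - (m - 1 + 1) = 0 by omega]
  simp [pvH]

lemma pvG_zero (costs : List Int) (strs : List String) (m : Nat) :
    pvG costs strs m 0
      = min (pvH (pvS strs 0) (pvSuff costs strs m 1))
            (((costs.getD 0 0 : Int) : WithTop Int) + pvH (pvRev (pvS strs 0)) (pvSuff costs strs m 1)) := by
  unfold pvG pvQ
  norm_num

-- ===== VERDICT (by name: the statement is the Claim_ definition above) =====
theorem reverso_lexycograph_spec : Claim_equal_reverso_lexycograph := by
  intro n costs strs _hdom hpre
  obtain ⟨h1, h2, h3⟩ := hpre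
  unfold Spec_reverso_lexycograph
  have hn : ((n.toNat : Nat) : Int) = n := Int.toNat_of_nonneg (by omega)
  have hm : 1 ≤ n.toNat := by omega
  rw [pvA_eval n costs strs n.toNat hm hn h2 h3, pvB_eval n costs strs n.toNat hm hn]
  rw [← pvG_last costs strs n.toNat hm, ← pvG_zero costs strs n.toNat]
  rw [pvG_const costs strs n.toNat (n.toNat - 1) hm (le_refl _)]
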